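-- pv_equiv track=rewrite | github.com/shantanubafna/GEOtcha | src/geotcha/extract/fields.py | detect_treatment
-- ===== SOURCE A (Python) =====
-- from typing import Optional
--
-- KNOWN_DRUGS = [
--     "infliximab", "adalimumab", "vedolizumab", "ustekinumab",
--     "tofacitinib", "filgotinib", "ozanimod", "risankizumab",
--     "golimumab", "certolizumab", "natalizumab", "rituximab",
--     "tocilizumab", "secukinumab", "ixekizumab", "guselkumab",
--     "prednisone", "prednisolone", "budesonide", "dexamethasone",
--     "hydrocortisone", "methylprednisolone",
--     "mesalamine", "mesalazine", "sulfasalazine",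
--     "azathioprine", "6-mercaptopurine", "methotrexate",
--     "cyclosporine", "tacrolimus", "mycophenolate",
--     "anti-tnf", "anti-il-12", "anti-il-23", "anti-integrin",
--     "jak inhibitor", "s1p modulator",
--     "placebo", "vehicle", "dmso",
-- ]
--
-- def detect_treatment(text: str) -> Optional[str]:
--     """Detect treatment from free text, returning a clean drug name or description.
--
--     Prefers returning just the drug name rather than surrounding context.
--     """
--     text_lower = text.lower()
--
--     # First try to find specific drug names
--     found_drugs: list[str] = []
--     for drug in KNOWN_DRUGS:
--         if drug in text_lower:
--             found_drugs.append(drug)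
--
--     if found_drugs:
--         # Return the most specific (longest) drug match
--         found_drugs.sort(key=len, reverse=True)
--         return found_drugs[0]
--
--     return None
-- ===== SOURCE B (Python) =====
-- from typing import Optional
--
-- KNOWN_DRUGS = [
--     "infliximab", "adalimumab", "vedolizumab", "ustekinumab",
--     "tofacitinib", "filgotinib", "ozanimod", "risankizumab",
--     "golimumab", "certolizumab", "natalizumab", "rituximab",
--     "tocilizumab", "secukinumab", "ixekizumab", "guselkumab",
--     "prednisone", "prednisolone", "budesonide", "dexamethasone",
--     "hydrocortisone", "methylprednisolone",
--     "mesalamine", "mesalazine", "sulfasalazine",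
--     "azathioprine", "6-mercaptopurine", "methotrexate",
--     "cyclosporine", "tacrolimus", "mycophenolate",
--     "anti-tnf", "anti-il-12", "anti-il-23", "anti-integrin",
--     "jak inhibitor", "s1p modulator",
--     "placebo", "vehicle", "dmso",
-- ]
--
-- def _better(best, drug):
--     return best is None or len(drug) > len(best)
--
-- def detect_treatment(text: str) -> Optional[str]:
--     """Detect treatment from free text, returning a clean drug name or description.
--
--     Prefers returning just the drug name rather than surrounding context.
--     """
--     text_lower = text.lower()
--     # Single pass with a running best: keep the first match of strictly
--     # greatest length (strict '>' preserves A's stable-sort tie-break).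
--     best: Optional[str] = None
--     for drug in KNOWN_DRUGS:
--         if drug in text_lower and _better(best, drug):
--             best = drug
--     return best
-- ===== Notes on version B (the rewrite author's own statement) =====
-- stated objective: simpler
-- what changed: B replaces A's gather-all-matches-then-sort-and-index pipeline with a single pass keeping a running longest match (strict > reproduces the stable sort's first-of-ties choice), so no intermediate list and no sorting.
import Mathlib
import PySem

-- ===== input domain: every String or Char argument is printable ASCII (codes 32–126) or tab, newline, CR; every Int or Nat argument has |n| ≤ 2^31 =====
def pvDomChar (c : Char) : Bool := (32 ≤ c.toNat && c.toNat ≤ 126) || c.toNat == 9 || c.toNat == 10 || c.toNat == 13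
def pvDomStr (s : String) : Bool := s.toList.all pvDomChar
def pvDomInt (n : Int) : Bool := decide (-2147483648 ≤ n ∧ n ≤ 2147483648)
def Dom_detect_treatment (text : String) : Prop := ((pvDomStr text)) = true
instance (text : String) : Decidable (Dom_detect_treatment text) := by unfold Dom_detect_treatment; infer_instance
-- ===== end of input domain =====

-- B replaces A's gather-all-matches-then-sort-and-index pipeline with a single pass
-- keeping the running longest match (strict '>' reproduces the stable sort's
-- first-of-ties choice); simpler per-call work, same result.


def KNOWN_DRUGS : List String := [
    "infliximab", "adalimumab", "vedolizumab", "ustekinumab",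
    "tofacitinib", "filgotinib", "ozanimod", "risankizumab",
    "golimumab", "certolizumab", "natalizumab", "rituximab",
    "tocilizumab", "secukinumab", "ixekizumab", "guselkumab",
    "prednisone", "prednisolone", "budesonide", "dexamethasone",
    "hydrocortisone", "methylprednisolone",
    "mesalamine", "mesalazine", "sulfasalazine",
    "azathioprine", "6-mercaptopurine", "methotrexate",
    "cyclosporine", "tacrolimus", "mycophenolate",
    "anti-tnf", "anti-il-12", "anti-il-23", "anti-integrin",
    "jak inhibitor", "s1p modulator",
    "placebo", "vehicle", "dmso"]

-- ===== PORT A =====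
def detect_treatment (text : String) : Option String :=
  let text_lower := PySem.Str.lower text
  let found_drugs : List String :=
    KNOWN_DRUGS.foldl (fun acc drug =>
      if PySem.Str.isIn drug text_lower then acc ++ [drug] else acc) []
  if found_drugs.isEmpty then none
  else PySem.List.pyGet? (PySem.List.sorted found_drugs (fun d => PySem.Str.len d) true) 0

-- ===== PORT B =====
-- helper _better(best, drug): 'best is None or len(drug) > len(best)'
def pvBetter (best : Option String) (drug : String) : Bool :=
  match best with
  | none => true
  | some b => decide (PySem.Str.len b < PySem.Str.len drug)

def detect_treatment_alt (text : String) : Option String :=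
  let text_lower := PySem.Str.lower text
  KNOWN_DRUGS.foldl (fun best drug =>
    if PySem.Str.isIn drug text_lower && pvBetter best drug
    then some drug else best) none

-- ===== PRECONDITION & SPEC =====
def Spec_detect_treatment (text : String) (out : Option String) : Prop := out = detect_treatment_alt text
instance (text : String) (out : Option String) : Decidable (Spec_detect_treatment text out) := by unfold Spec_detect_treatment; infer_instance

-- ===== CLAIM (what is proved, stated in full; the proofs are below) =====
def Claim_equal_detect_treatment : Prop := ∀ (text : String), Dom_detect_treatment text → Spec_detect_treatment text (detect_treatment text)

-- ===== LEMMAS AND PROOFS =====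

-- B's per-element update (the loop body after the 'drug in text_lower' test).
def pvStep (best : Option String) (d : String) : Option String :=
  if pvBetter best d then some d else best

-- The guarded fold over the whole list equals the unguarded fold over the filtered list.
theorem pv_fold_guard_filter (p : String → Bool) :
    ∀ (l : List String) (best : Option String),
    l.foldl (fun best d => if p d && pvBetter best d then some d else best) best
      = (l.filter p).foldl pvStep best := by
  intro l
  induction l with
  | nil => intro best; rfl
  | cons x xs ih =>
    intro best
    simp only [List.foldl_cons, List.filter_cons]
    cases hpx : p x with
    | true =>
      simp only [Bool.true_and]
      exact ih _
    | false =>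
      simp only [Bool.false_and, Bool.false_eq_true, if_false]
      exact ih best

-- Head of an insertion into the length-descending insertion sort is one pvStep.
theorem pv_head_insertBy (x : String) (acc : List String) :
    (PySem.List.insertBy (fun a b => decide (PySem.Str.len b < PySem.Str.len a)) x acc).head?
      = pvStep acc.head? x := by
  cases acc with
  | nil => simp [PySem.List.insertBy, pvStep, pvBetter]
  | cons y ys =>
    simp only [PySem.List.insertBy, pvStep, pvBetter, List.head?_cons]
    split_ifs <;> simp_all

-- The head of the insertion-sort fold is the pvStep fold of the heads.
theorem pv_head_foldl_insertBy :
    ∀ (l : List String) (acc : List String),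
    (l.foldl (fun acc x =>
        PySem.List.insertBy (fun a b => decide (PySem.Str.len b < PySem.Str.len a)) x acc) acc).head?
      = l.foldl pvStep acc.head? := by
  intro l
  induction l with
  | nil => intro acc; rfl
  | cons x xs ih =>
    intro acc
    simp only [List.foldl_cons]
    rw [ih, pv_head_insertBy]

-- Hence: head of the stable length-descending sort = running-best fold.
theorem pv_head_sorted (l : List String) :
    (PySem.List.sorted l (fun d => PySem.Str.len d) true).head? = l.foldl pvStep none := by
  rw [PySem.List.sorted_rev_eq_foldl_insertBy, pv_head_foldl_insertBy]; rfl

-- A = B for an arbitrary containment predicate p (the goal shape after inlining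
-- text_lower): gather-filter-sort-index equals the running-best fold.
theorem pv_main (p : String → Bool) (l : List String) :
    (if (l.foldl (fun acc drug => if p drug then acc ++ [drug] else acc)
          ([] : List String)).isEmpty then none
     else PySem.List.pyGet?
       (PySem.List.sorted
         (l.foldl (fun acc drug => if p drug then acc ++ [drug] else acc) [])
         (fun d => PySem.Str.len d) true) 0)
    = l.foldl (fun best drug =>
        if p drug && pvBetter best drug then some drug else best) none := by
  have hfd : l.foldl (fun acc drug => if p drug then acc ++ [drug] else acc)
      ([] : List String) = l.filter p := by
    simpa using PySem.List.foldl_append_if p (fun d => d) l []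
  rw [hfd, pv_fold_guard_filter p l none, ← pv_head_sorted]
  by_cases hnil : l.filter p = []
  · have h0 : PySem.List.sorted ([] : List String) (fun d => PySem.Str.len d) true = [] :=
      (PySem.List.sorted_eq_nil_iff _ _ _).mpr rfl
    rw [hnil, h0]; rfl
  · rw [if_neg (by simpa [List.isEmpty_iff] using hnil)]
    cases hs : PySem.List.sorted (l.filter p) (fun d => PySem.Str.len d) true with
    | nil => exact absurd ((PySem.List.sorted_eq_nil_iff _ _ _).mp hs) hnil
    | cons m t => simp [PySem.List.pyGet?, PySem.List.pyIdx?]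

-- ===== VERDICT (by name: the statement is the Claim_ definition above) =====
theorem detect_treatment_spec : Claim_equal_detect_treatment := by
  intro text _
  unfold Spec_detect_treatment detect_treatment detect_treatment_alt
  simp only []
  exact pv_main (fun drug => PySem.Str.isIn drug (PySem.Str.lower text)) KNOWN_DRUGS
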